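-- pv_equiv track=rewrite | github.com/rfranciss/mybot | strategy_analyzer.py | _generate_strategies
-- ===== SOURCE A (Python) =====
-- MHI_RSI = "MHI_RSI"
--
-- RSI_REVERSAL = "RSI_REVERSAL"
--
-- PRICE_ACTION = "PRICE_ACTION"
--
-- MULTI_CONFIRMATION = "MULTI_CONFIRMATION"
--
-- TREND_FOLLOW = "TREND_FOLLOW"
--
-- UP = "up"
--
-- DOWN = "down"
--
-- def _generate_strategies(trend, indicators_used):
--     strategies = [PRICE_ACTION]
--     if "RSI" in indicators_used:
--         strategies += [MHI_RSI, RSI_REVERSAL]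
--     if "MACD" in indicators_used or trend in (UP, DOWN):
--         strategies.append(TREND_FOLLOW)
--     if len(set(indicators_used)) >= 2:
--         strategies.append(MULTI_CONFIRMATION)
--
--     out = []
--     for s in strategies:
--         if s not in out:
--             out.append(s)
--     return out[:4]
-- ===== SOURCE B (Python) =====
-- MHI_RSI = "MHI_RSI"
-- RSI_REVERSAL = "RSI_REVERSAL"
-- PRICE_ACTION = "PRICE_ACTION"
-- MULTI_CONFIRMATION = "MULTI_CONFIRMATION"
-- TREND_FOLLOW = "TREND_FOLLOW"
-- UP = "up"
-- DOWN = "down"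
--
-- # Precomputed decision table: every possible output, keyed by the three
-- # independent condition bits (has RSI, trend-follow applies, >= 2 distinct
-- # indicators). The whole list construction (ordering, dedup, truncation to 4)
-- # is baked into the table at definition time.
-- _TABLE = {
--     (False, False, False): [PRICE_ACTION],
--     (False, False, True):  [PRICE_ACTION, MULTI_CONFIRMATION],
--     (False, True,  False): [PRICE_ACTION, TREND_FOLLOW],
--     (False, True,  True):  [PRICE_ACTION, TREND_FOLLOW, MULTI_CONFIRMATION],
--     (True,  False, False): [PRICE_ACTION, MHI_RSI, RSI_REVERSAL],
--     (True,  False, True):  [PRICE_ACTION, MHI_RSI, RSI_REVERSAL, MULTI_CONFIRMATION],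
--     (True,  True,  False): [PRICE_ACTION, MHI_RSI, RSI_REVERSAL, TREND_FOLLOW],
--     (True,  True,  True):  [PRICE_ACTION, MHI_RSI, RSI_REVERSAL, TREND_FOLLOW],
-- }
--
-- def _generate_strategies(trend, indicators_used):
--     key = (
--         "RSI" in indicators_used,
--         "MACD" in indicators_used or trend in (UP, DOWN),
--         len(set(indicators_used)) >= 2,
--     )
--     return list(_TABLE[key])
-- ===== Notes on version B (the rewrite author's own statement) =====
-- stated objective: alternative
-- what changed: Replaces the imperative list assembly (conditional appends, order-preserving dedup loop, final [:4] slice) with a fully precomputed 8-entry decision table keyed by the three condition bits; the function only evaluates the bits and looks the answer up.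
import Mathlib
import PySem

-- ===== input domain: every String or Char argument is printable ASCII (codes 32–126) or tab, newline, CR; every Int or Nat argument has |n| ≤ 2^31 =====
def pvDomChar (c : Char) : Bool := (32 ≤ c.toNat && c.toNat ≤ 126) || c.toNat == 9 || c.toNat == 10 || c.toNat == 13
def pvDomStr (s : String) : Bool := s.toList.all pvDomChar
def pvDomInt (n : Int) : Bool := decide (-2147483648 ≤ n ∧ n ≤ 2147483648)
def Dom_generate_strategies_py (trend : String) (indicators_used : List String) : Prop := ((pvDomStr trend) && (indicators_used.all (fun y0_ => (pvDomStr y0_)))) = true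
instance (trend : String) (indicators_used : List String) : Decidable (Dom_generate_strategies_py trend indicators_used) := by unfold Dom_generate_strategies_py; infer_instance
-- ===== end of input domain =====

-- B replaces A's conditional appends + dedup loop + [:4] slice by a precomputed 8-entry decision table keyed by the three condition bits (alternative formulation, same cost).

-- ===== PORT A =====
def generate_strategies_py (trend : String) (indicators_used : List String) : List String :=
  let strategies := ["PRICE_ACTION"]
  let strategies := if "RSI" ∈ indicators_used then strategies ++ ["MHI_RSI", "RSI_REVERSAL"] else strategies
  let strategies := if "MACD" ∈ indicators_used ∨ trend = "up" ∨ trend = "down" then strategies ++ ["TREND_FOLLOW"] else strategies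
  let strategies := if 2 ≤ (PySem.Set.ofList indicators_used).length then strategies ++ ["MULTI_CONFIRMATION"] else strategies
  let out := strategies.foldl (fun out s => if s ∈ out then out else out ++ [s]) []
  out.take 4

-- ===== PORT B =====
-- precomputed decision table: dict keyed by the three condition bits (literal lookup ported as a match)
def pvTable_generate_strategies_py : Bool × Bool × Bool → List String
  | (false, false, false) => ["PRICE_ACTION"]
  | (false, false, true)  => ["PRICE_ACTION", "MULTI_CONFIRMATION"]
  | (false, true,  false) => ["PRICE_ACTION", "TREND_FOLLOW"]
  | (false, true,  true)  => ["PRICE_ACTION", "TREND_FOLLOW", "MULTI_CONFIRMATION"]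
  | (true,  false, false) => ["PRICE_ACTION", "MHI_RSI", "RSI_REVERSAL"]
  | (true,  false, true)  => ["PRICE_ACTION", "MHI_RSI", "RSI_REVERSAL", "MULTI_CONFIRMATION"]
  | (true,  true,  false) => ["PRICE_ACTION", "MHI_RSI", "RSI_REVERSAL", "TREND_FOLLOW"]
  | (true,  true,  true)  => ["PRICE_ACTION", "MHI_RSI", "RSI_REVERSAL", "TREND_FOLLOW"]

def generate_strategies_py_alt (trend : String) (indicators_used : List String) : List String :=
  pvTable_generate_strategies_py
    (decide ("RSI" ∈ indicators_used),
     decide ("MACD" ∈ indicators_used ∨ trend = "up" ∨ trend = "down"),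
     decide (2 ≤ (PySem.Set.ofList indicators_used).length))

-- ===== PRECONDITION & SPEC =====
def Spec_generate_strategies_py (trend : String) (indicators_used : List String) (out : List String) : Prop := out = generate_strategies_py_alt trend indicators_used
instance (trend : String) (indicators_used : List String) (out : List String) : Decidable (Spec_generate_strategies_py trend indicators_used out) := by unfold Spec_generate_strategies_py; infer_instance

-- ===== CLAIM (what is proved, stated in full; the proofs are below) =====
def Claim_equal_generate_strategies_py : Prop := ∀ (trend : String) (indicators_used : List String), Dom_generate_strategies_py trend indicators_used → Spec_generate_strategies_py trend indicators_used (generate_strategies_py trend indicators_used)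

-- ===== LEMMAS AND PROOFS =====

-- ===== VERDICT (by name: the statement is the Claim_ definition above) =====
theorem generate_strategies_py_spec : Claim_equal_generate_strategies_py := by
  intro trend indicators_used _
  unfold Spec_generate_strategies_py generate_strategies_py generate_strategies_py_alt
  by_cases h1 : "RSI" ∈ indicators_used <;>
    by_cases h2 : "MACD" ∈ indicators_used ∨ trend = "up" ∨ trend = "down" <;>
      by_cases h3 : 2 ≤ (PySem.Set.ofList indicators_used).length <;>
        simp [h1, h2, h3, pvTable_generate_strategies_py, List.foldl, List.take]
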